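-- pv_equiv track=rewrite | github.com/cmondorf/Code-dojo | CodeWars/Python/beggars/beggars.py | beggars
-- ===== SOURCE A (Python) =====
-- def beggars(values, n):
--     #your code here
--     beggars = [0] * n
--     if len(beggars) == 0:
--         return beggars
--     beggar_tracker = 0
--     for i in range(len(values)):
--         if beggar_tracker == n:
--             beggar_tracker = 0
--         beggars[beggar_tracker] += values[i]
--         beggar_tracker += 1
--     return beggars
-- ===== SOURCE B (Python) =====
-- def beggars(values, n):
--     # gather: each beggar i receives every n-th value starting at offset i
--     return [sum(values[i::n]) for i in range(n)]
-- ===== Notes on version B (the rewrite author's own statement) =====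
-- stated objective: simpler
-- what changed: Replaces A's scatter loop over values with a mutable bucket list and a wrap-around tracker by a one-line gather: each beggar's total is the sum of the stride slice values[i::n].
import Mathlib
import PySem

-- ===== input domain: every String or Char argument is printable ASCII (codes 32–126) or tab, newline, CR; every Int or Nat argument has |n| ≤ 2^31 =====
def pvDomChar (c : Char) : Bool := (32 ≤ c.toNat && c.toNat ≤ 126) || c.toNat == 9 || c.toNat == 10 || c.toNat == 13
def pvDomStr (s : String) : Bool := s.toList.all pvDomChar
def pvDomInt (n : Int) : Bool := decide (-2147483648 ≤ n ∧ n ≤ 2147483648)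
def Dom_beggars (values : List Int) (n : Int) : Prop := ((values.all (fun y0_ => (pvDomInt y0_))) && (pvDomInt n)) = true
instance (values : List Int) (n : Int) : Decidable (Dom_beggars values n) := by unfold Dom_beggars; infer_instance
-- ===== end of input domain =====

-- B replaces A's scatter loop (mutable buckets + wrap-around tracker) by a per-beggar
-- gather over the stride slices values[i::n]; same return value, simpler decomposition.


-- ===== PORT A =====
-- body of A's for-loop: reset the tracker when it reaches n, add the value into the bucket, advance
def stepA (n : Int) (st : List Int × Int) (v : Int) : List Int × Int :=
  (PySem.List.pySetD st.1 (if st.2 = n then (0:Int) else st.2)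
      (PySem.List.pyGetD st.1 (if st.2 = n then (0:Int) else st.2) 0 + v),
   (if st.2 = n then (0:Int) else st.2) + 1)

def beggars (values : List Int) (n : Int) : List Int :=
  let bs := List.replicate n.toNat (0:Int)          -- [0] * n
  if bs.length = 0 then bs
  else ((PySem.List.pyRange 0 (values.length : Int) 1).foldl
          (fun st i => stepA n st (PySem.List.pyGetD values i 0)) (bs, 0)).1

-- ===== PORT B =====
def beggars_alt (values : List Int) (n : Int) : List Int :=
  (PySem.List.pyRange 0 n 1).map
    (fun i => ((PySem.List.slice? values (some i) none n).getD []).sum)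

-- ===== PRECONDITION & SPEC =====
def Spec_beggars (values : List Int) (n : Int) (out : List Int) : Prop := out = beggars_alt values n
instance (values : List Int) (n : Int) (out : List Int) : Decidable (Spec_beggars values n out) := by unfold Spec_beggars; infer_instance

-- ===== CLAIM (what is proved, stated in full; the proofs are below) =====
def Claim_equal_beggars : Prop := ∀ (values : List Int) (n : Int), Dom_beggars values n → Spec_beggars values n (beggars values n)

-- ===== LEMMAS AND PROOFS =====

-- elements of xs at indices j, j+m, j+2m, …
def strideList : List Int → Nat → Nat → List Int
  | [], _, _ => []
  | x :: t, 0, m => x :: strideList t (m-1) m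
  | _ :: t, j+1, m => strideList t j m

-- add the elements of c into b elementwise starting at index tr
def padAdd : List Int → Nat → List Int → List Int
  | b, _, [] => b
  | b, tr, x :: t => padAdd (b.set tr (b.getD tr 0 + x)) (tr+1) t

theorem strideList_skip (xs : List Int) (j m : Nat) :
    strideList xs j m = strideList (xs.drop j) 0 m := by
  induction xs generalizing j with
  | nil => simp [strideList]
  | cons x t ih =>
    cases j with
    | zero => simp
    | succ j => simpa [strideList] using ih j

theorem strideList_nil_of_le (xs : List Int) (j m : Nat) (h : xs.length ≤ j) :
    strideList xs j m = [] := by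
  rw [strideList_skip, List.drop_eq_nil_of_le h]; rfl

theorem strideList_chunk (xs : List Int) (j m : Nat) (hm : 0 < m) :
    strideList xs j m = xs[j]?.toList ++ strideList (xs.drop m) j m := by
  rw [strideList_skip, strideList_skip (xs.drop m)]
  rw [List.drop_drop]
  have base : ∀ ys : List Int, strideList ys 0 m = ys[0]?.toList ++ strideList (ys.drop m) 0 m := by
    intro ys
    cases ys with
    | nil => simp [strideList]
    | cons y t =>
      have : (y :: t).drop m = t.drop (m-1) := by
        cases m with
        | zero => omega
        | succ m => simp
      rw [this]
      simp [strideList, strideList_skip t (m-1)]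
  have := base (xs.drop j)
  rw [this, List.drop_drop]
  congr 2
  · simp [List.getElem?_drop]
  · congr 1; omega

theorem strideList_getElem? (xs : List Int) (j m k : Nat) (hm : 0 < m) :
    (strideList xs j m)[k]? = xs[j + m * k]? := by
  induction xs generalizing j k with
  | nil => simp [strideList]
  | cons x t ih =>
    cases j with
    | zero =>
      cases k with
      | zero => simp [strideList]
      | succ k =>
        simp only [strideList, List.getElem?_cons_succ]
        rw [ih (m-1) k, show 0 + m * (k+1) = ((m-1) + m * k) + 1 by
            rw [Nat.mul_succ]; omega, List.getElem?_cons_succ]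
    | succ j =>
      simp only [strideList]
      rw [ih j k]
      simp [Nat.succ_add]

theorem strideList_length (xs : List Int) (j m : Nat) (hm : 0 < m) :
    (strideList xs j m).length = (xs.length - j + m - 1) / m := by
  induction xs generalizing j with
  | nil =>
    simp only [strideList, List.length_nil, Nat.zero_sub, Nat.zero_add]
    rw [Nat.div_eq_of_lt (by omega)]
  | cons x t ih =>
    cases j with
    | zero =>
      simp only [strideList, List.length_cons]
      rw [ih (m-1), show t.length + 1 - 0 + m - 1 = t.length + m by omega,
        Nat.add_div_right _ hm]
      by_cases h : m - 1 ≤ t.length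
      · rw [show t.length - (m-1) + m - 1 = t.length by omega]
      · rw [Nat.div_eq_of_lt (by omega), Nat.div_eq_of_lt (by omega)]
    | succ j =>
      simp only [strideList, List.length_cons]
      rw [ih j]
      congr 1
      omega

theorem filterMap_getElem?_range (L : List Int) (c : Nat) :
    List.filterMap (fun k => L[k]?) (List.range c) = L.take c := by
  induction c with
  | zero => simp
  | succ c ih =>
    rw [List.range_succ, List.filterMap_append, ih, List.take_add_one]
    cases h : L[c]? <;> simp [h]

-- B's slice values[j::m] (step m > 0) is exactly the stride list
theorem slice?_stride (xs : List Int) (j m : Nat) (hm : 0 < m) :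
    PySem.List.slice? xs (some (j:Int)) none (m:Int) = some (strideList xs j m) := by
  simp only [PySem.List.slice?, PySem.List.sliceIndices]
  have h1 : ¬((m:Int) < 0) := by omega
  have h2 : ¬((j:Int) < 0) := by omega
  have h3 : (m:Int) ≠ 0 := by omega
  have h4 : (0:Int) < (m:Int) := by omega
  simp only [h1, h2, h3, h4, if_false, if_pos]
  by_cases hj : j < xs.length
  · have hmin : min (j:Int) (xs.length:Int) = (j:Int) := min_eq_left (by omega)
    have hlt : ((j:Int) : Int) < (xs.length:Int) := by omega
    rw [hmin, if_pos hlt]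
    have hc : (((xs.length:Int) - (j:Int) + (m:Int) - 1) / (m:Int)).toNat
        = (xs.length - j + m - 1) / m := by
      rw [show ((xs.length:Int) - (j:Int) + (m:Int) - 1) = ((xs.length - j + m - 1 : Nat) : Int) by omega]
      rw [← Int.natCast_div, Int.toNat_natCast]
    rw [hc]
    have harg : (fun k : Nat => xs[((j:Int) + (m:Int) * (k:Int)).toNat]?)
        = fun k : Nat => (strideList xs j m)[k]? := by
      funext k
      rw [show ((j:Int) + (m:Int) * (k:Int)).toNat = j + m * k by omega]
      rw [strideList_getElem? xs j m k hm]
    simp only [harg]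
    rw [filterMap_getElem?_range, ← strideList_length xs j m hm, List.take_length]
  · have hmin : min (j:Int) (xs.length:Int) = (xs.length:Int) := min_eq_right (by omega)
    rw [hmin, if_neg (by omega)]
    simp [strideList_nil_of_le xs j m (by omega)]

theorem slice?_stride' (xs : List Int) (j : Nat) (n : Int) (hn : 0 < n) :
    PySem.List.slice? xs (some (j:Int)) none n = some (strideList xs j n.toNat) := by
  have h := slice?_stride xs j n.toNat (by omega)
  rw [show ((n.toNat : Nat) : Int) = n by omega] at h
  exact h

-- chunk lemma: while the tracker stays below n, A's loop is plain elementwise addition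
theorem foldl_stepA_chunk (n : Int) (c : List Int) :
    ∀ (b : List Int) (tr : Nat), (tr:Int) + c.length ≤ n →
    c.foldl (stepA n) (b, (tr:Int)) = (padAdd b tr c, (tr:Int) + c.length) := by
  induction c with
  | nil => intro b tr h; simp [padAdd]
  | cons x t ih =>
    intro b tr h
    have htr : (tr:Int) ≠ n := by simp at h; omega
    have : stepA n (b, (tr:Int)) x
        = (b.set tr (b.getD tr 0 + x), ((tr+1 : Nat) : Int)) := by
      simp [stepA, htr, PySem.List.pySetD_natCast, PySem.List.pyGetD_natCast]
    rw [List.foldl_cons, this, ih _ (tr+1) (by simp at h ⊢; omega)]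
    simp [padAdd]
    omega

theorem padAdd_length (c : List Int) : ∀ (b : List Int) (tr : Nat),
    (padAdd b tr c).length = b.length := by
  induction c with
  | nil => intro b tr; rfl
  | cons x t ih => intro b tr; simp [padAdd, ih]

theorem padAdd_getD (c : List Int) : ∀ (b : List Int) (tr j : Nat), tr + c.length ≤ b.length →
    (padAdd b tr c).getD j 0
      = b.getD j 0 + (if tr ≤ j ∧ j < tr + c.length then c.getD (j - tr) 0 else 0) := by
  induction c with
  | nil => intro b tr j h; simp [padAdd]
  | cons x t ih =>
    intro b tr j h
    simp only [List.length_cons] at h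
    simp only [padAdd]
    rw [ih _ (tr+1) j (by simp; omega)]
    have hset : ∀ i : Nat, (b.set tr (b.getD tr 0 + x)).getD i 0
        = if i = tr then b.getD tr 0 + x else b.getD i 0 := by
      intro i
      by_cases hi : i = tr
      · subst hi
        rw [List.getD_eq_getElem?_getD, List.getElem?_set_self (by omega)]
        simp
      · rw [List.getD_eq_getElem?_getD, List.getElem?_set_ne (by omega),
          ← List.getD_eq_getElem?_getD, if_neg hi]
    rw [hset j]
    by_cases hj : j = tr
    · subst hj
      rw [if_pos rfl, if_neg (by omega), if_pos (by simp), Nat.sub_self]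
      simp
    · rw [if_neg hj]
      by_cases h2 : tr + 1 ≤ j ∧ j < tr + 1 + t.length
      · rw [if_pos h2, if_pos (by simp; omega)]
        congr 1
        rw [show j - tr = (j - (tr+1)) + 1 by omega]
        simp
      · rw [if_neg h2, if_neg (by simp; omega)]

theorem strideList_short (xs : List Int) (j m : Nat) (hm : 0 < m) (h : xs.length ≤ m) :
    strideList xs j m = xs[j]?.toList := by
  rw [strideList_chunk xs j m hm, List.drop_eq_nil_of_le h]
  cases xs <;> simp [strideList]

-- a tracker that has reached n behaves like a tracker reset to 0
theorem foldl_stepA_reset (n : Int) (b : List Int) (rest : List Int) :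
    (rest.foldl (stepA n) (b, n)).1 = (rest.foldl (stepA n) (b, 0)).1 := by
  cases rest with
  | nil => rfl
  | cons x t =>
    rw [List.foldl_cons, List.foldl_cons]
    congr 2 <;> simp [stepA]

theorem gather_short (n : Int) (values b : List Int)
    (hv : values.length ≤ n.toNat) (hb : b.length = n.toNat) :
    (values.foldl (stepA n) (b, 0)).1
      = (List.range n.toNat).map (fun j => b.getD j 0 + (strideList values j n.toNat).sum) := by
  have hn' : 0 < n.toNat ∨ n.toNat = 0 := by omega
  rcases hn' with hm | hm
  · have h0 := foldl_stepA_chunk n values b 0 (by push_cast; omega)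
    push_cast at h0
    rw [h0]
    apply List.ext_getElem (by simp [padAdd_length, hb])
    intro j h1 h2
    simp only [List.getElem_map, List.getElem_range]
    rw [← List.getD_eq_getElem _ 0 h1, padAdd_getD _ _ _ _ (by omega)]
    rw [strideList_short values j n.toNat hm hv]
    congr 1
    by_cases hj : j < values.length
    · rw [if_pos (by omega), List.getElem?_eq_getElem hj]
      simp only [Nat.sub_zero, Option.toList_some, List.sum_cons, List.sum_nil, add_zero]
      exact List.getD_eq_getElem _ 0 hj
    · rw [if_neg (by omega), List.getElem?_eq_none (by omega)]
      simp
  · have hb0 : b = [] := by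
      cases b with
      | nil => rfl
      | cons y t => simp [hm] at hb
    have hv0 : values = [] := by
      cases values with
      | nil => rfl
      | cons y t => simp [hm] at hv
    subst hb0; subst hv0
    simp [hm]

-- A's scatter loop computes, bucket by bucket, the stride sums (fuel k bounds |values|)
theorem foldl_stepA_gather (n : Int) (hn : 0 < n) :
    ∀ (k : Nat) (values b : List Int), values.length ≤ k → b.length = n.toNat →
    (values.foldl (stepA n) (b, 0)).1
      = (List.range n.toNat).map (fun j => b.getD j 0 + (strideList values j n.toNat).sum) := by
  intro k
  induction k with
  | zero =>
    intro values b hk hb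
    exact gather_short n values b (by omega) hb
  | succ k ih =>
    intro values b hk hb
    by_cases hv : values.length ≤ n.toNat
    · exact gather_short n values b hv hb
    · have hm : 0 < n.toNat := by omega
      have hsplit : values = values.take n.toNat ++ values.drop n.toNat :=
        (List.take_append_drop _ _).symm
      conv_lhs => rw [hsplit]
      rw [List.foldl_append]
      have hcl : (values.take n.toNat).length = n.toNat := by
        rw [List.length_take]; omega
      have h0 := foldl_stepA_chunk n (values.take n.toNat) b 0 (by push_cast; omega)
      push_cast at h0
      rw [h0, hcl]
      rw [show ((n.toNat : Int)) = n by omega, zero_add]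
      rw [foldl_stepA_reset n]
      rw [ih (values.drop n.toNat) _ (by simp; omega) (by rw [padAdd_length]; exact hb)]
      apply List.map_congr_left
      intro j hj
      simp only [List.mem_range] at hj
      rw [padAdd_getD _ _ _ _ (by omega)]
      rw [if_pos (by omega)]
      have hjv : j < values.length := by omega
      rw [strideList_chunk values j n.toNat hm, List.sum_append,
        List.getElem?_eq_getElem hjv]
      simp only [Nat.sub_zero, Option.toList_some, List.sum_cons, List.sum_nil, add_zero]
      have : (values.take n.toNat).getD j 0 = values[j] := by
        rw [List.getD_eq_getElem?_getD, List.getElem?_take_of_lt (by omega),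
          List.getElem?_eq_getElem hjv]
        rfl
      rw [this]
      ring

-- ===== VERDICT (by name: the statement is the Claim_ definition above) =====
theorem beggars_spec : Claim_equal_beggars := by
  intro values n _
  unfold Spec_beggars beggars beggars_alt
  by_cases hn : 0 < n
  · have hne : ¬ (List.replicate n.toNat (0:Int)).length = 0 := by
      simp; omega
    rw [if_neg hne]
    rw [PySem.List.foldl_pyRange_zero_pyGetD' values 0 (stepA n) (List.replicate n.toNat 0, 0)]
    rw [foldl_stepA_gather n hn values.length values _ (le_refl _) (by simp)]
    rw [PySem.List.pyRange_one 0 n]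
    rw [List.map_map, show ((n - 0 : Int)).toNat = n.toNat by omega]
    apply List.map_congr_left
    intro j hj
    simp only [List.mem_range] at hj
    have hjm : j < n.toNat := hj
    simp only [Function.comp]
    rw [show (0:Int) + (j:Int) = ((j:Nat):Int) by omega]
    rw [slice?_stride' values j n hn]
    have hrep : (List.replicate n.toNat (0:Int)).getD j 0 = 0 := by
      simp only [List.getD_eq_getElem?_getD, List.getElem?_replicate]
      rw [if_pos hjm]
      rfl
    rw [hrep, Option.getD_some, zero_add]
  · rw [if_pos (by simp; omega)]
    rw [PySem.List.pyRange_one_eq_nil (by omega)]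
    simp [show n.toNat = 0 by omega]
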